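-- pv_equiv track=rewrite | github.com/kainitschke/doiscout | definitions.py | cut_ids
-- ===== SOURCE A (Python) =====
-- def cut_ids(id_txt, not_this_time=list()):  # split if there are multiple IDs in a line; cuts it and returns it # works recursively
--     forbidden_words = ["Prüfplancode", "CTRI/2007/091/000008", '\ufeff'] # "EudraCT", "EUDRACT",
--     result          = list()
--     if (id_txt.find(',') != -1)&(words_contained(',', not_this_time)==False):
--         trenner     = id_txt.find(',')
--         result      = result + cut_ids(id_txt[0: trenner], not_this_time) + cut_ids(id_txt[trenner + 1: len(id_txt)], not_this_time)
--
--     elif (id_txt.find('"') != -1)&(words_contained('"', not_this_time)==False):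
--         trenner     = id_txt.find('"')
--         result      = result + cut_ids(id_txt[0: trenner], not_this_time) + cut_ids(id_txt[trenner + 1: len(id_txt)], not_this_time)
--
--     elif (id_txt.find(chr(9)) != -1)&(words_contained(chr(9), not_this_time)==False):
--         trenner     = id_txt.find(chr(9))
--         result      = result + cut_ids(id_txt[0: trenner], not_this_time) + cut_ids(id_txt[trenner + 1: len(id_txt)], not_this_time)
--
--     elif words_contained(id_txt, forbidden_words):
--         id_txt      = filter_words(id_txt, forbidden_words)
--         result      = result + cut_ids(id_txt, not_this_time)
--
--     elif (id_txt.find('http') != -1)&(words_contained('http', not_this_time)==False):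
--         result      = list()
--
--     elif (id_txt.find(';') != -1)&(words_contained(';', not_this_time)==False):
--         trenner     = id_txt.find(';')
--         result      = result + cut_ids(id_txt[0: trenner], not_this_time) + cut_ids(id_txt[trenner + 1: len(id_txt)], not_this_time)
--
--     elif (id_txt.find(':') != -1)&(words_contained(':', not_this_time)==False):
--         trenner     = id_txt.find(':')
--         result      = result + cut_ids(id_txt[0: trenner], not_this_time) + cut_ids(id_txt[trenner + 1: len(id_txt)], not_this_time)
--
--     elif len(id_txt) == 0:
--         result      = list()
--
--     else:
--         result.append(id_txt)
--     return result
--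
-- def words_contained(id_txt, forbidden_words):
--     for word in forbidden_words:
--         if id_txt.find(word) != -1:
--             return True
--     return False
--
-- def filter_words(id_txt, forbidden_words):
--     for word in forbidden_words:
--         if id_txt.find(word) != -1:
--             idx = id_txt.find(word)
--             return id_txt[0: idx] + id_txt[idx + len(word): len(id_txt)]
-- ===== SOURCE B (Python) =====
-- def cut_ids(id_txt, not_this_time=list()):
--     # Table-driven worklist rewrite: delimiter availability is decided once up front,
--     # and the recursion is replaced by an explicit stack of pending segments.
--     forbidden_words = ["Pr\u00fcfplancode", "CTRI/2007/091/000008", '\ufeff']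
--
--     def enabled(d):
--         return all(w not in d for w in not_this_time)
--
--     early = [d for d in (',', '"', '\t') if enabled(d)]
--     late = [d for d in (';', ':') if enabled(d)]
--     http_enabled = enabled('http')
--
--     out = []
--     stack = [id_txt]
--     while stack:
--         s = stack.pop()
--         d = next((d for d in early if d in s), None)
--         if d is not None:
--             i = s.find(d)
--             stack.append(s[i + 1:])
--             stack.append(s[:i])
--             continue
--         w = next((w for w in forbidden_words if w in s), None)
--         if w is not None:
--             i = s.find(w)
--             stack.append(s[:i] + s[i + len(w):])
--             continue
--         if http_enabled and 'http' in s: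
--             continue
--         d = next((d for d in late if d in s), None)
--         if d is not None:
--             i = s.find(d)
--             stack.append(s[i + 1:])
--             stack.append(s[:i])
--             continue
--         if s:
--             out.append(s)
--     return out
-- ===== Notes on version B (the rewrite author's own statement) =====
-- stated objective: alternative
-- what changed: Replaces A's seven-branch recursive if/elif chain, which re-tests delimiter availability against not_this_time on every recursive call, by an explicit worklist (stack of pending segments) driven by delimiter tables and an http flag computed once up front.
import Mathlib
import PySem

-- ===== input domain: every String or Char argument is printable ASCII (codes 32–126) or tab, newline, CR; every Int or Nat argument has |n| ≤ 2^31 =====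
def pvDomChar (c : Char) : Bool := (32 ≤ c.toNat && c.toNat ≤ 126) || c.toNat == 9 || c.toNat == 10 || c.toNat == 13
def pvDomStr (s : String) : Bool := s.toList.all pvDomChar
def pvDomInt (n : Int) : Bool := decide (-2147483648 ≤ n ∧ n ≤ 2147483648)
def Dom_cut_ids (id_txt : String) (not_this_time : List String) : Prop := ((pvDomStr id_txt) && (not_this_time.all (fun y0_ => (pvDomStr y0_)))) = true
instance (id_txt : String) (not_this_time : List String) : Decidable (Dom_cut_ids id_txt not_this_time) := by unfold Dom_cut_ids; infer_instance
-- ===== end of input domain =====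

-- B replaces A's seven-way recursive if/elif chain by a table-driven worklist: delimiter
-- availability is decided once up front and the recursion becomes an explicit stack (objective: alternative).

-- ── helpers shared by both termination proofs (cited by name in decreasing_by) ──

lemma pvFindOcc {s sub : List Char} (h : PySem.Chars.find s sub ≠ -1) :
    0 ≤ PySem.Chars.find s sub ∧ (PySem.Chars.find s sub).toNat + sub.length ≤ s.length := by
  have h0 : 0 ≤ PySem.Chars.find s sub :=
    (PySem.Chars.find_nonneg_iff s sub).2 ((PySem.Chars.find_ne_neg_one_iff s sub).1 h)
  have hle := PySem.Chars.find_le_length s sub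
  have hlen := (PySem.Chars.find_spec h0).1.length_le
  simp only [List.length_drop] at hlen
  omega

lemma pvLenSliceL (s : List Char) (i : Int) (h0 : 0 ≤ i) (hle : i.toNat ≤ s.length) :
    (PySem.Chars.slice s (some 0) (some i)).length = i.toNat := by
  rw [PySem.Chars.slice_eq_listSlice, PySem.List.slice_toNat s le_rfl h0]
  simp
  omega

lemma pvLenSliceR (s : List Char) (i : Int) (h0 : 0 ≤ i) :
    (PySem.Chars.slice s (some i) (some (s.length : Int))).length = s.length - i.toNat := by
  rw [PySem.Chars.slice_eq_listSlice, PySem.List.slice_toNat s h0 (by positivity)]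
  simp

lemma pvIsIn_find_ne {sub s : List Char} (h : PySem.Chars.isIn sub s = true) :
    PySem.Chars.find s sub ≠ -1 :=
  (PySem.Chars.find_ne_neg_one_iff s sub).2 ((PySem.Chars.isIn_iff_infix sub s).1 h)

-- exact piece lengths of a single-character split, used by both decreasing_by blocks
lemma pvSplitLens (s : List Char) (c : Char) (h : PySem.Chars.find s [c] ≠ -1) :
    (PySem.Chars.slice s (some 0) (some (PySem.Chars.find s [c]))).length
        = (PySem.Chars.find s [c]).toNat ∧
      (PySem.Chars.slice s (some (PySem.Chars.find s [c] + 1)) (some (s.length : Int))).length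
        = s.length - ((PySem.Chars.find s [c]).toNat + 1) ∧
      (PySem.Chars.find s [c]).toNat + 1 ≤ s.length := by
  obtain ⟨h0, hocc⟩ := pvFindOcc h
  simp only [List.length_cons, List.length_nil] at hocc
  refine ⟨pvLenSliceL _ _ h0 (by omega), ?_, by omega⟩
  rw [pvLenSliceR _ _ (by omega)]
  omega

-- ===== PORT A =====
-- A works on strings; the port works on the code-point lists (PySem.Chars) and the String
-- wrappers convert at the boundary.  Python locals 'trenner'/'idx' are inlined (same values).

def pvForbiddenA : List (List Char) :=
  ["Prüfplancode".toList, "CTRI/2007/091/000008".toList, ['\ufeff']]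

def pvWordsContained (id_txt : List Char) (forbidden_words : List (List Char)) : Bool :=
  match forbidden_words with
  | [] => false
  | word :: rest =>
    if PySem.Chars.find id_txt word ≠ -1 then true
    else pvWordsContained id_txt rest

-- Python's filter_words returns None when no word matches; A only calls it when
-- words_contained is true, so that case is unreachable — the port returns id_txt there.
def pvFilterWords (id_txt : List Char) (forbidden_words : List (List Char)) : List Char :=
  match forbidden_words with
  | [] => id_txt
  | word :: rest =>
    if PySem.Chars.find id_txt word ≠ -1 then
      PySem.Chars.slice id_txt (some 0) (some (PySem.Chars.find id_txt word)) ++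
        PySem.Chars.slice id_txt (some (PySem.Chars.find id_txt word + word.length))
          (some (id_txt.length : Int))
    else pvFilterWords id_txt rest

lemma pvFilterWords_len (id_txt : List Char) (ws : List (List Char))
    (hne : ∀ w ∈ ws, w ≠ []) (h : pvWordsContained id_txt ws = true) :
    (pvFilterWords id_txt ws).length < id_txt.length := by
  induction ws with
  | nil => simp [pvWordsContained] at h
  | cons w rest ih =>
    by_cases hf : PySem.Chars.find id_txt w ≠ -1
    · obtain ⟨h0, hocc⟩ := pvFindOcc hf
      have hw : 0 < w.length := List.length_pos_iff.2 (hne w (by simp))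
      simp only [pvFilterWords]
      rw [if_pos hf, List.length_append, pvLenSliceL _ _ h0 (by omega),
        pvLenSliceR _ _ (by omega)]
      omega
    · simp only [pvWordsContained] at h
      rw [if_neg hf] at h
      simp only [pvFilterWords]
      rw [if_neg hf]
      exact ih (fun v hv => hne v (by simp [hv])) h

def pvCutA (id_txt : List Char) (ntt : List (List Char)) : List (List Char) :=
  if h1 : PySem.Chars.find id_txt [','] ≠ -1 ∧ pvWordsContained [','] ntt = false then
    pvCutA (PySem.Chars.slice id_txt (some 0) (some (PySem.Chars.find id_txt [',']))) ntt ++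
      pvCutA (PySem.Chars.slice id_txt (some (PySem.Chars.find id_txt [','] + 1))
        (some (id_txt.length : Int))) ntt
  else if h2 : PySem.Chars.find id_txt ['"'] ≠ -1 ∧ pvWordsContained ['"'] ntt = false then
    pvCutA (PySem.Chars.slice id_txt (some 0) (some (PySem.Chars.find id_txt ['"']))) ntt ++
      pvCutA (PySem.Chars.slice id_txt (some (PySem.Chars.find id_txt ['"'] + 1))
        (some (id_txt.length : Int))) ntt
  else if h3 : PySem.Chars.find id_txt ['\t'] ≠ -1 ∧ pvWordsContained ['\t'] ntt = false then
    pvCutA (PySem.Chars.slice id_txt (some 0) (some (PySem.Chars.find id_txt ['\t']))) ntt ++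
      pvCutA (PySem.Chars.slice id_txt (some (PySem.Chars.find id_txt ['\t'] + 1))
        (some (id_txt.length : Int))) ntt
  else if h4 : pvWordsContained id_txt pvForbiddenA = true then
    pvCutA (pvFilterWords id_txt pvForbiddenA) ntt
  else if PySem.Chars.find id_txt "http".toList ≠ -1 ∧
      pvWordsContained "http".toList ntt = false then
    []
  else if h6 : PySem.Chars.find id_txt [';'] ≠ -1 ∧ pvWordsContained [';'] ntt = false then
    pvCutA (PySem.Chars.slice id_txt (some 0) (some (PySem.Chars.find id_txt [';']))) ntt ++
      pvCutA (PySem.Chars.slice id_txt (some (PySem.Chars.find id_txt [';'] + 1))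
        (some (id_txt.length : Int))) ntt
  else if h7 : PySem.Chars.find id_txt [':'] ≠ -1 ∧ pvWordsContained [':'] ntt = false then
    pvCutA (PySem.Chars.slice id_txt (some 0) (some (PySem.Chars.find id_txt [':']))) ntt ++
      pvCutA (PySem.Chars.slice id_txt (some (PySem.Chars.find id_txt [':'] + 1))
        (some (id_txt.length : Int))) ntt
  else if id_txt.length = 0 then
    []
  else
    [id_txt]
termination_by id_txt.length
decreasing_by
  · have := pvSplitLens id_txt ',' h1.1; omega
  · have := pvSplitLens id_txt ',' h1.1; omega
  · have := pvSplitLens id_txt '"' h2.1; omega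
  · have := pvSplitLens id_txt '"' h2.1; omega
  · have := pvSplitLens id_txt '\t' h3.1; omega
  · have := pvSplitLens id_txt '\t' h3.1; omega
  · exact pvFilterWords_len id_txt pvForbiddenA (by decide) h4
  · have := pvSplitLens id_txt ';' h6.1; omega
  · have := pvSplitLens id_txt ';' h6.1; omega
  · have := pvSplitLens id_txt ':' h7.1; omega
  · have := pvSplitLens id_txt ':' h7.1; omega

def cut_ids (id_txt : String) (not_this_time : List String) : List String :=
  (pvCutA id_txt.toList (not_this_time.map String.toList)).map String.ofList

-- ===== PORT B =====

def pvForbiddenB : List (List Char) :=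
  ["Prüfplancode".toList, "CTRI/2007/091/000008".toList, ['\ufeff']]

-- all(w not in d for w in not_this_time)
def pvEnabled (ntt : List (List Char)) (d : List Char) : Bool :=
  ntt.all (fun w => !PySem.Chars.isIn w d)

-- the worklist loop of Source B: stack of pending segments, out is the result accumulator
def pvGo (early late : List Char) (httpEn : Bool) (stack out : List (List Char)) :
    List (List Char) :=
  match stack with
  | [] => out
  | s :: rest =>
    match hE : early.find? (fun d => PySem.Chars.isIn [d] s) with
    | some d =>
      pvGo early late httpEn
        (PySem.Chars.slice s (some 0) (some (PySem.Chars.find s [d])) ::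
          PySem.Chars.slice s (some (PySem.Chars.find s [d] + 1)) (some (s.length : Int)) ::
          rest) out
    | none =>
      match hF : pvForbiddenB.find? (fun w => PySem.Chars.isIn w s) with
      | some w =>
        pvGo early late httpEn
          ((PySem.Chars.slice s (some 0) (some (PySem.Chars.find s w)) ++
              PySem.Chars.slice s (some (PySem.Chars.find s w + w.length))
                (some (s.length : Int))) :: rest) out
      | none =>
        if httpEn && PySem.Chars.isIn "http".toList s then
          pvGo early late httpEn rest out
        else
          match hL : late.find? (fun d => PySem.Chars.isIn [d] s) with
          | some d =>
            pvGo early late httpEn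
              (PySem.Chars.slice s (some 0) (some (PySem.Chars.find s [d])) ::
                PySem.Chars.slice s (some (PySem.Chars.find s [d] + 1)) (some (s.length : Int)) ::
                rest) out
          | none =>
            if s.isEmpty then pvGo early late httpEn rest out
            else pvGo early late httpEn rest (out ++ [s])
termination_by (stack.map (fun t => 2 * t.length + 1)).sum
decreasing_by
  · have hd : PySem.Chars.isIn [d] s = true := by simpa using List.find?_some hE
    have := pvSplitLens s d (pvIsIn_find_ne hd)
    simp only [List.map_cons, List.sum_cons]
    omega
  · have hw : 0 < w.length := by
      have := List.mem_of_find?_eq_some hF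
      have hne : w ≠ [] := by
        revert this; simp only [pvForbiddenB, List.mem_cons, List.not_mem_nil, or_false]
        rintro (h | h | h) <;> subst h <;> decide
      exact List.length_pos_iff.2 hne
    have hd : PySem.Chars.isIn w s = true := by simpa using List.find?_some hF
    obtain ⟨h0, hocc⟩ := pvFindOcc (pvIsIn_find_ne hd)
    simp only [List.map_cons, List.sum_cons, List.length_append]
    rw [pvLenSliceL _ _ h0 (by omega), pvLenSliceR _ _ (by omega)]
    omega
  · simp only [List.map_cons, List.sum_cons]; omega
  · have hd : PySem.Chars.isIn [d] s = true := by simpa using List.find?_some hL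
    have := pvSplitLens s d (pvIsIn_find_ne hd)
    simp only [List.map_cons, List.sum_cons]
    omega
  · simp only [List.map_cons, List.sum_cons]; omega
  · simp only [List.map_cons, List.sum_cons]; omega

def cut_ids_alt (id_txt : String) (not_this_time : List String) : List String :=
  let ntt := not_this_time.map String.toList
  let early := [',', '"', '\t'].filter (fun d => pvEnabled ntt [d])
  let late := [';', ':'].filter (fun d => pvEnabled ntt [d])
  (pvGo early late (pvEnabled ntt "http".toList) [id_txt.toList] []).map String.ofList

-- ===== PRECONDITION & SPEC =====
def Spec_cut_ids (id_txt : String) (not_this_time : List String) (out : List String) : Prop := out = cut_ids_alt id_txt not_this_time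
instance (id_txt : String) (not_this_time : List String) (out : List String) : Decidable (Spec_cut_ids id_txt not_this_time out) := by unfold Spec_cut_ids; infer_instance

-- ===== CLAIM (what is proved, stated in full; the proofs are below) =====
def Claim_equal_cut_ids : Prop := ∀ (id_txt : String) (not_this_time : List String), Dom_cut_ids id_txt not_this_time → Spec_cut_ids id_txt not_this_time (cut_ids id_txt not_this_time)

-- ===== LEMMAS AND PROOFS =====

lemma pvForbiddenB_eq : pvForbiddenB = pvForbiddenA := rfl

lemma pvWC_eq (t : List Char) (ws : List (List Char)) :
    pvWordsContained t ws = ws.any (fun w => PySem.Chars.isIn w t) := by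
  induction ws with
  | nil => simp [pvWordsContained]
  | cons w rest ih =>
    by_cases hf : PySem.Chars.find t w ≠ -1
    · have : PySem.Chars.isIn w t = true :=
        (PySem.Chars.isIn_iff_infix w t).2 ((PySem.Chars.find_ne_neg_one_iff t w).1 hf)
      simp [pvWordsContained, hf, this]
    · simp only [ne_eq, not_not] at hf
      have : PySem.Chars.isIn w t = false :=
        (PySem.Chars.isIn_eq_false_iff w t).2 ((PySem.Chars.find_eq_neg_one_iff t w).1 hf)
      simp [pvWordsContained, hf, this, ih]

lemma pvEnabled_eq (ntt : List (List Char)) (d : List Char) :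
    pvEnabled ntt d = !pvWordsContained d ntt := by
  rw [pvWC_eq, pvEnabled, List.all_eq_not_any_not]
  simp

lemma pvCond_iff (s sub : List Char) (ntt : List (List Char)) :
    (PySem.Chars.find s sub ≠ -1 ∧ pvWordsContained sub ntt = false) ↔
      (pvEnabled ntt sub && PySem.Chars.isIn sub s) = true := by
  rw [pvEnabled_eq]
  simp [PySem.Chars.find_ne_neg_one_iff, PySem.Chars.isIn_iff_infix, and_comm]

lemma pvWC_isSome (t : List Char) (ws : List (List Char)) :
    pvWordsContained t ws = (ws.find? (fun w => PySem.Chars.isIn w t)).isSome := by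
  rw [pvWC_eq]
  induction ws with
  | nil => simp
  | cons w rest ih => by_cases hw : PySem.Chars.isIn w t = true <;> simp [hw, ih]

lemma pvFW_eq (t : List Char) (ws : List (List Char)) (w : List Char)
    (h : ws.find? (fun w => PySem.Chars.isIn w t) = some w) :
    pvFilterWords t ws =
      PySem.Chars.slice t (some 0) (some (PySem.Chars.find t w)) ++
        PySem.Chars.slice t (some (PySem.Chars.find t w + w.length)) (some (t.length : Int)) := by
  induction ws with
  | nil => simp at h
  | cons v rest ih =>
    by_cases hv : PySem.Chars.isIn v t = true
    · rw [List.find?_cons_of_pos (p := fun w => PySem.Chars.isIn w t) hv] at h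
      obtain rfl : v = w := by injection h
      simp only [pvFilterWords]
      rw [if_pos (pvIsIn_find_ne hv)]
    · rw [List.find?_cons_of_neg (p := fun w => PySem.Chars.isIn w t) hv] at h
      have hf : ¬ PySem.Chars.find t v ≠ -1 := by
        simp only [ne_eq, not_not]
        exact (PySem.Chars.find_eq_neg_one_iff t v).2
          ((PySem.Chars.isIn_eq_false_iff v t).1 (by simpa using hv))
      simp only [pvFilterWords, hf, if_neg, not_false_eq_true]
      exact ih h

lemma pvFirst_filter (ntt : List (List Char)) (tbl : List Char) (s : List Char) :
    (tbl.filter (fun d => pvEnabled ntt [d])).find? (fun d => PySem.Chars.isIn [d] s) =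
      tbl.find? (fun d => pvEnabled ntt [d] && PySem.Chars.isIn [d] s) := by
  rw [List.find?_filter]
  congr 1
  funext d
  by_cases h : pvEnabled ntt [d] = true <;> simp [h]

-- ── branch lemmas: what pvCutA does in each of pvGo's cases ──

lemma pvA_early (s : List Char) (ntt : List (List Char)) (d : Char)
    (hE : ([',', '"', '\t'].filter (fun c => pvEnabled ntt [c])).find?
        (fun c => PySem.Chars.isIn [c] s) = some d) :
    pvCutA s ntt =
      pvCutA (PySem.Chars.slice s (some 0) (some (PySem.Chars.find s [d]))) ntt ++
        pvCutA (PySem.Chars.slice s (some (PySem.Chars.find s [d] + 1)) (some (s.length : Int)))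
          ntt := by
  rw [pvFirst_filter] at hE
  by_cases b1 : (pvEnabled ntt [','] && PySem.Chars.isIn [','] s) = true
  · rw [List.find?_cons_of_pos (p := fun c => pvEnabled ntt [c] && PySem.Chars.isIn [c] s) b1] at hE
    obtain rfl : ',' = d := by injection hE
    rw [pvCutA, dif_pos ((pvCond_iff s [','] ntt).2 b1)]
  · rw [List.find?_cons_of_neg (p := fun c => pvEnabled ntt [c] && PySem.Chars.isIn [c] s) b1] at hE
    by_cases b2 : (pvEnabled ntt ['"'] && PySem.Chars.isIn ['"'] s) = true
    · rw [List.find?_cons_of_pos (p := fun c => pvEnabled ntt [c] && PySem.Chars.isIn [c] s) b2] at hE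
      obtain rfl : '"' = d := by injection hE
      rw [pvCutA, dif_neg (fun hc => b1 ((pvCond_iff s [','] ntt).1 hc)),
        dif_pos ((pvCond_iff s ['"'] ntt).2 b2)]
    · rw [List.find?_cons_of_neg (p := fun c => pvEnabled ntt [c] && PySem.Chars.isIn [c] s) b2] at hE
      by_cases b3 : (pvEnabled ntt ['\t'] && PySem.Chars.isIn ['\t'] s) = true
      · rw [List.find?_cons_of_pos (p := fun c => pvEnabled ntt [c] && PySem.Chars.isIn [c] s) b3] at hE
        obtain rfl : '\t' = d := by injection hE
        rw [pvCutA, dif_neg (fun hc => b1 ((pvCond_iff s [','] ntt).1 hc)),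
          dif_neg (fun hc => b2 ((pvCond_iff s ['"'] ntt).1 hc)),
          dif_pos ((pvCond_iff s ['\t'] ntt).2 b3)]
      · rw [List.find?_cons_of_neg (p := fun c => pvEnabled ntt [c] && PySem.Chars.isIn [c] s) b3] at hE
        simp at hE

lemma pvA_no_early (s : List Char) (ntt : List (List Char))
    (hE : ([',', '"', '\t'].filter (fun c => pvEnabled ntt [c])).find?
        (fun c => PySem.Chars.isIn [c] s) = none) :
    ∀ c ∈ ([',', '"', '\t'] : List Char),
      ¬ (PySem.Chars.find s [c] ≠ -1 ∧ pvWordsContained [c] ntt = false) := by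
  rw [pvFirst_filter] at hE
  intro c hc hcond
  have := (List.find?_eq_none.1 hE) c hc
  exact this ((pvCond_iff s [c] ntt).1 hcond)

lemma pvA_forbidden (s : List Char) (ntt : List (List Char)) (w : List Char)
    (hE : ([',', '"', '\t'].filter (fun c => pvEnabled ntt [c])).find?
        (fun c => PySem.Chars.isIn [c] s) = none)
    (hF : pvForbiddenA.find? (fun w => PySem.Chars.isIn w s) = some w) :
    pvCutA s ntt =
      pvCutA (PySem.Chars.slice s (some 0) (some (PySem.Chars.find s w)) ++
        PySem.Chars.slice s (some (PySem.Chars.find s w + w.length)) (some (s.length : Int)))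
        ntt := by
  have hne := pvA_no_early s ntt hE
  have h4 : pvWordsContained s pvForbiddenA = true := by
    rw [pvWC_isSome, hF]; rfl
  rw [pvCutA, dif_neg (hne ',' (by simp)), dif_neg (hne '"' (by simp)),
    dif_neg (hne '\t' (by simp)), dif_pos h4, pvFW_eq s pvForbiddenA w hF]

lemma pvA_http (s : List Char) (ntt : List (List Char))
    (hE : ([',', '"', '\t'].filter (fun c => pvEnabled ntt [c])).find?
        (fun c => PySem.Chars.isIn [c] s) = none)
    (hF : pvForbiddenA.find? (fun w => PySem.Chars.isIn w s) = none)
    (hH : (pvEnabled ntt "http".toList && PySem.Chars.isIn "http".toList s) = true) :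
    pvCutA s ntt = [] := by
  have hne := pvA_no_early s ntt hE
  have h4 : ¬ pvWordsContained s pvForbiddenA = true := by
    rw [pvWC_isSome, hF]; simp
  rw [pvCutA, dif_neg (hne ',' (by simp)), dif_neg (hne '"' (by simp)),
    dif_neg (hne '\t' (by simp)), dif_neg h4,
    if_pos ((pvCond_iff s "http".toList ntt).2 hH)]

lemma pvA_late (s : List Char) (ntt : List (List Char)) (d : Char)
    (hE : ([',', '"', '\t'].filter (fun c => pvEnabled ntt [c])).find?
        (fun c => PySem.Chars.isIn [c] s) = none)
    (hF : pvForbiddenA.find? (fun w => PySem.Chars.isIn w s) = none)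
    (hH : (pvEnabled ntt "http".toList && PySem.Chars.isIn "http".toList s) = false)
    (hL : ([';', ':'].filter (fun c => pvEnabled ntt [c])).find?
        (fun c => PySem.Chars.isIn [c] s) = some d) :
    pvCutA s ntt =
      pvCutA (PySem.Chars.slice s (some 0) (some (PySem.Chars.find s [d]))) ntt ++
        pvCutA (PySem.Chars.slice s (some (PySem.Chars.find s [d] + 1)) (some (s.length : Int)))
          ntt := by
  have hne := pvA_no_early s ntt hE
  have h4 : ¬ pvWordsContained s pvForbiddenA = true := by
    rw [pvWC_isSome, hF]; simp
  have h5 : ¬ (PySem.Chars.find s "http".toList ≠ -1 ∧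
      pvWordsContained "http".toList ntt = false) := by
    intro hc
    rw [(pvCond_iff s "http".toList ntt).1 hc] at hH
    exact Bool.noConfusion hH
  rw [pvFirst_filter] at hL
  by_cases b1 : (pvEnabled ntt [';'] && PySem.Chars.isIn [';'] s) = true
  · rw [List.find?_cons_of_pos (p := fun c => pvEnabled ntt [c] && PySem.Chars.isIn [c] s) b1] at hL
    obtain rfl : ';' = d := by injection hL
    rw [pvCutA, dif_neg (hne ',' (by simp)), dif_neg (hne '"' (by simp)),
      dif_neg (hne '\t' (by simp)), dif_neg h4, if_neg h5,
      dif_pos ((pvCond_iff s [';'] ntt).2 b1)]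
  · rw [List.find?_cons_of_neg (p := fun c => pvEnabled ntt [c] && PySem.Chars.isIn [c] s) b1] at hL
    by_cases b2 : (pvEnabled ntt [':'] && PySem.Chars.isIn [':'] s) = true
    · rw [List.find?_cons_of_pos (p := fun c => pvEnabled ntt [c] && PySem.Chars.isIn [c] s) b2] at hL
      obtain rfl : ':' = d := by injection hL
      rw [pvCutA, dif_neg (hne ',' (by simp)), dif_neg (hne '"' (by simp)),
        dif_neg (hne '\t' (by simp)), dif_neg h4, if_neg h5,
        dif_neg (fun hc => b1 ((pvCond_iff s [';'] ntt).1 hc)),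
        dif_pos ((pvCond_iff s [':'] ntt).2 b2)]
    · rw [List.find?_cons_of_neg (p := fun c => pvEnabled ntt [c] && PySem.Chars.isIn [c] s) b2] at hL
      simp at hL

lemma pvA_tail (s : List Char) (ntt : List (List Char))
    (hE : ([',', '"', '\t'].filter (fun c => pvEnabled ntt [c])).find?
        (fun c => PySem.Chars.isIn [c] s) = none)
    (hF : pvForbiddenA.find? (fun w => PySem.Chars.isIn w s) = none)
    (hH : (pvEnabled ntt "http".toList && PySem.Chars.isIn "http".toList s) = false)
    (hL : ([';', ':'].filter (fun c => pvEnabled ntt [c])).find?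
        (fun c => PySem.Chars.isIn [c] s) = none) :
    pvCutA s ntt = if s.isEmpty then [] else [s] := by
  have hne := pvA_no_early s ntt hE
  have h4 : ¬ pvWordsContained s pvForbiddenA = true := by
    rw [pvWC_isSome, hF]; simp
  have h5 : ¬ (PySem.Chars.find s "http".toList ≠ -1 ∧
      pvWordsContained "http".toList ntt = false) := by
    intro hc
    rw [(pvCond_iff s "http".toList ntt).1 hc] at hH
    exact Bool.noConfusion hH
  have hnl : ∀ c ∈ ([';', ':'] : List Char),
      ¬ (PySem.Chars.find s [c] ≠ -1 ∧ pvWordsContained [c] ntt = false) := by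
    rw [pvFirst_filter] at hL
    intro c hc hcond
    exact (List.find?_eq_none.1 hL) c hc ((pvCond_iff s [c] ntt).1 hcond)
  rw [pvCutA, dif_neg (hne ',' (by simp)), dif_neg (hne '"' (by simp)),
    dif_neg (hne '\t' (by simp)), dif_neg h4, if_neg h5,
    dif_neg (hnl ';' (by simp)), dif_neg (hnl ':' (by simp))]
  by_cases h0 : s.length = 0
  · simp [List.length_eq_zero_iff.1 h0]
  · have : ¬ s.isEmpty = true := by
      simp [List.isEmpty_iff]
      intro hs; exact h0 (by simp [hs])
    simp [h0, this]

-- ── the worklist invariant ──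

lemma pvGo_eq (ntt : List (List Char)) (n : Nat) :
    ∀ (stack out : List (List Char)),
      (stack.map (fun t => 2 * t.length + 1)).sum ≤ n →
      pvGo ([',', '"', '\t'].filter (fun d => pvEnabled ntt [d]))
          ([';', ':'].filter (fun d => pvEnabled ntt [d]))
          (pvEnabled ntt "http".toList) stack out
        = out ++ (stack.map (fun s => pvCutA s ntt)).flatten := by
  induction n with
  | zero =>
    intro stack out h
    match stack with
    | [] => simp [pvGo]
    | s :: rest => simp [List.map_cons, List.sum_cons] at h
  | succ n ih =>
    intro stack out h
    match stack with
    | [] => simp [pvGo]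
    | s :: rest =>
      rw [pvGo]
      cases hE : ([',', '"', '\t'].filter (fun d => pvEnabled ntt [d])).find?
          (fun d => PySem.Chars.isIn [d] s) with
      | some d =>
        simp only [hE]
        have hd : PySem.Chars.isIn [d] s = true := by simpa using List.find?_some hE
        have hlen := pvSplitLens s d (pvIsIn_find_ne hd)
        rw [ih _ out (by simp only [List.map_cons, List.sum_cons] at h ⊢; omega)]
        simp only [List.map_cons, List.flatten_cons]
        rw [pvA_early s ntt d hE]
        simp [List.append_assoc]
      | none =>
        simp only [hE]
        cases hF : pvForbiddenB.find? (fun w => PySem.Chars.isIn w s) with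
        | some w =>
          simp only [hF]
          have hw : 0 < w.length := by
            have hmem := List.mem_of_find?_eq_some hF
            have : w ≠ [] := by
              revert hmem; simp [pvForbiddenB]
              rintro (h | h | h) <;> simp [h]
            exact List.length_pos_iff.2 this
          have hd : PySem.Chars.isIn w s = true := by simpa using List.find?_some hF
          obtain ⟨h0, hocc⟩ := pvFindOcc (pvIsIn_find_ne hd)
          rw [ih _ out (by
            simp only [List.map_cons, List.sum_cons, List.length_append] at h ⊢
            rw [pvLenSliceL _ _ h0 (by omega), pvLenSliceR _ _ (by omega)]
            omega)]
          simp only [List.map_cons, List.flatten_cons]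
          rw [pvA_forbidden s ntt w hE (pvForbiddenB_eq ▸ hF)]
        | none =>
          simp only [hF]
          by_cases hH : (pvEnabled ntt "http".toList && PySem.Chars.isIn "http".toList s) = true
          · rw [if_pos hH]
            rw [ih rest out (by simp only [List.map_cons, List.sum_cons] at h; omega)]
            simp only [List.map_cons, List.flatten_cons]
            rw [pvA_http s ntt hE (pvForbiddenB_eq ▸ hF) hH]
            simp
          · rw [if_neg hH]
            have hH' : (pvEnabled ntt "http".toList && PySem.Chars.isIn "http".toList s) = false := by
              simpa using hH
            cases hL : ([';', ':'].filter (fun d => pvEnabled ntt [d])).find?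
                (fun d => PySem.Chars.isIn [d] s) with
            | some d =>
              simp only [hL]
              have hd : PySem.Chars.isIn [d] s = true := by simpa using List.find?_some hL
              have hlen := pvSplitLens s d (pvIsIn_find_ne hd)
              rw [ih _ out (by simp only [List.map_cons, List.sum_cons] at h ⊢; omega)]
              simp only [List.map_cons, List.flatten_cons]
              rw [pvA_late s ntt d hE (pvForbiddenB_eq ▸ hF) hH' hL]
              simp [List.append_assoc]
            | none =>
              simp only [hL]
              have htail := pvA_tail s ntt hE (pvForbiddenB_eq ▸ hF) hH' hL
              by_cases hemp : s.isEmpty = true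
              · rw [if_pos hemp]
                rw [ih rest out (by simp only [List.map_cons, List.sum_cons] at h; omega)]
                simp [htail, hemp]
              · rw [if_neg hemp]
                rw [ih rest (out ++ [s])
                  (by simp only [List.map_cons, List.sum_cons] at h; omega)]
                simp [htail, hemp]

-- ===== VERDICT (by name: the statement is the Claim_ definition above) =====
theorem cut_ids_spec : Claim_equal_cut_ids := by
  unfold Claim_equal_cut_ids
  intro id_txt not_this_time _
  unfold Spec_cut_ids cut_ids cut_ids_alt
  show List.map String.ofList (pvCutA id_txt.toList (not_this_time.map String.toList)) =
    List.map String.ofList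
      (pvGo ([',', '"', '\t'].filter (fun d => pvEnabled (not_this_time.map String.toList) [d]))
        ([';', ':'].filter (fun d => pvEnabled (not_this_time.map String.toList) [d]))
        (pvEnabled (not_this_time.map String.toList) "http".toList) [id_txt.toList] [])
  rw [pvGo_eq (not_this_time.map String.toList)
    (([id_txt.toList].map (fun t => 2 * t.length + 1)).sum) [id_txt.toList] [] le_rfl]
  simp
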